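-- pv_equiv track=rewrite | github.com/UeresWally/desafio-lia | main.py | search
-- ===== SOURCE A (Python) =====
-- def search(courses, params=None):
--     result = []
--
--     def extract_ids(data):
--         return [{"id": item["id"]} for item in data]
--
--     if params is None:
--         for idioma_data in courses.values():
--             for niveis_data in idioma_data.values():
--                 for periodos_data in niveis_data.values():
--                     result.extend(extract_ids(periodos_data))
--     else:
--         idioma_param = params[0] if len(params) > 0 else None
--         nivel_param = params[1] if len(params) > 1 else None
--         periodo_param = params[2] if len(params) > 2 else None
--
--         for idioma, idioma_data in courses.items():
--             if idioma_param is None or idioma_param == idioma: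
--                 if nivel_param is None:
--                     for nivel_data in idioma_data.values():
--                         if periodo_param is None:
--                             for periodos_data in nivel_data.values():
--                                 result.extend(extract_ids(periodos_data))
--                         else:
--                             if periodo_param in nivel_data:
--                                 result.extend(extract_ids(nivel_data[periodo_param]))
--                 elif nivel_param in idioma_data:
--                     if periodo_param is None:
--                         for periodos_data in idioma_data[nivel_param].values():
--                             result.extend(extract_ids(periodos_data))
--                     elif periodo_param in idioma_data[nivel_param]:
--                         result.extend(extract_ids(idioma_data[nivel_param][periodo_param]))
--
--     return result
-- ===== SOURCE B (Python) =====
-- def search(courses, params=None):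
--     ps = params if params is not None else []
--
--     def rec(data, depth):
--         if depth == 3:
--             return [{"id": item["id"]} for item in data]
--         key = ps[depth] if depth < len(ps) else None
--         if key is None:
--             out = []
--             for value in data.values():
--                 out += rec(value, depth + 1)
--             return out
--         if key in data:
--             return rec(data[key], depth + 1)
--         return []
--
--     return rec(courses, 0)
-- ===== Notes on version B (the rewrite author's own statement) =====
-- stated objective: simpler
-- what changed: Replaces the two large iterative branches (params None vs given) and their nested filter-specific loops by one uniform recursive helper rec(data, depth) that reads the depth's filter key and either fans out over all values or descends through the single matching key.
import Mathlib
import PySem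

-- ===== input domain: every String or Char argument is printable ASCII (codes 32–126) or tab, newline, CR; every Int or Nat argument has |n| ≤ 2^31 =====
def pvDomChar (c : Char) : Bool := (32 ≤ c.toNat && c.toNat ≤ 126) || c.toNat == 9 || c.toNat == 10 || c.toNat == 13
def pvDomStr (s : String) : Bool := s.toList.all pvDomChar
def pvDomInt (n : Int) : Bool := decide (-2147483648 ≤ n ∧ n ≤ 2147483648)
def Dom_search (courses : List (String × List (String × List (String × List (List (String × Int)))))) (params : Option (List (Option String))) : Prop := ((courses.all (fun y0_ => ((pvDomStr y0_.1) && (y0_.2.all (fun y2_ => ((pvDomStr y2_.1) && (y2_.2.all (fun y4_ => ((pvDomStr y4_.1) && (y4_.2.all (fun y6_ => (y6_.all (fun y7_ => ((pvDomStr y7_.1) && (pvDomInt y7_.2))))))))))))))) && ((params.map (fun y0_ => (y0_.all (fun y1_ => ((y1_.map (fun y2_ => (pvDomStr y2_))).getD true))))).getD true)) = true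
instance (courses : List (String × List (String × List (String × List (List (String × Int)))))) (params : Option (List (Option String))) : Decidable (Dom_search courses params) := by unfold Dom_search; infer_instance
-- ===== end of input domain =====

-- B replaces A's two big iterative branches by one uniform recursive descent helper (objective: simpler).

-- ===== PORT A =====
-- item["id"] raises KeyError when the key is missing; that is excluded by Pre_search, the getD default is unreachable there
def extract_ids (data : List (List (String × Int))) : List (List (String × Int)) :=
  data.map (fun item => [("id", (PySem.Dict.mk item).getD "id" 0)])

-- the innermost branch of A's else-arm: the periodo level ('if periodo_param is None … else if periodo_param in …')
def pvA2 (periodo_param : Option String) (result : List (List (String × Int)))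
    (nivel_data : List (String × List (List (String × Int)))) : List (List (String × Int)) :=
  match periodo_param with
  | none => nivel_data.foldl (fun result pentry => result ++ extract_ids pentry.2) result
  | some pp =>
      if nivel_data.any (fun q => q.1 == pp) then
        result ++ extract_ids (((nivel_data.find? (fun q => q.1 == pp)).map Prod.snd).getD [])
      else result

-- the nivel level of A's else-arm ('if nivel_param is None … elif nivel_param in idioma_data …')
def pvA1 (nivel_param periodo_param : Option String) (result : List (List (String × Int)))
    (idioma_data : List (String × List (String × List (List (String × Int))))) : List (List (String × Int)) :=
  match nivel_param with
  | none => idioma_data.foldl (fun result nentry => pvA2 periodo_param result nentry.2) result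
  | some np =>
      if idioma_data.any (fun q => q.1 == np) then
        pvA2 periodo_param result (((idioma_data.find? (fun q => q.1 == np)).map Prod.snd).getD [])
      else result

def search (courses : List (String × List (String × List (String × List (List (String × Int)))))) (params : Option (List (Option String))) : List (List (String × Int)) :=
  match params with
  | none =>
      courses.foldl (fun result ientry =>
        ientry.2.foldl (fun result nentry =>
          nentry.2.foldl (fun result pentry =>
            result ++ extract_ids pentry.2) result) result) []
  | some ps =>
      let idioma_param := ps.getD 0 none
      let nivel_param := ps.getD 1 none
      let periodo_param := ps.getD 2 none
      courses.foldl (fun result ientry =>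
        if idioma_param = none ∨ idioma_param = some ientry.1 then
          pvA1 nivel_param periodo_param result ientry.2
        else result) []

-- ===== PORT B =====
-- one step of rec(data, depth) for depth < 3: fan out over all values, or descend through the single matching key
def pvStep {α : Type} (key : Option String) (data : List (String × α))
    (rec : α → List (List (String × Int))) : List (List (String × Int)) :=
  match key with
  | none => (data.map (fun p => p.2)).foldl (fun out v => out ++ rec v) []
  | some k =>
      match data.find? (fun p => p.1 == k) with
      | some p => rec p.2
      | none => []

def search_alt (courses : List (String × List (String × List (String × List (List (String × Int)))))) (params : Option (List (Option String))) : List (List (String × Int)) :=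
  let ps := params.getD []
  pvStep (ps.getD 0 none) courses (fun d1 =>
    pvStep (ps.getD 1 none) d1 (fun d2 =>
      pvStep (ps.getD 2 none) d2 (fun d3 =>
        d3.map (fun item => [("id", (PySem.Dict.mk item).getD "id" 0)]))))

-- ===== PRECONDITION & SPEC =====
-- does a dict key pass the (optional) filter key of its level?
def pvKeyOk (kp : Option String) (s : String) : Bool :=
  match kp with
  | none => true
  | some k => k == s

-- Pre_ excludes (a) inputs where an item dict that the filters let A reach lacks the "id" key — Python A raises
-- KeyError there — and (b) association lists with duplicate top-level keys, which do not represent any Python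
-- dict (there A's level-0 equality scan would visit every duplicate).
def Pre_search (courses : List (String × List (String × List (String × List (List (String × Int)))))) (params : Option (List (Option String))) : Prop :=
  (courses.map Prod.fst).Nodup ∧
  (let ps := params.getD []
   courses.all (fun a => !pvKeyOk (ps.getD 0 none) a.1 ||
     a.2.all (fun b => !pvKeyOk (ps.getD 1 none) b.1 ||
       b.2.all (fun c => !pvKeyOk (ps.getD 2 none) c.1 ||
         c.2.all (fun item => item.any (fun p => p.1 == "id")))))) = true
instance (courses : List (String × List (String × List (String × List (List (String × Int)))))) (params : Option (List (Option String))) : Decidable (Pre_search courses params) := by unfold Pre_search; infer_instance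

def pvWitness_search : (List (String × List (String × List (String × List (List (String × Int)))))) × Option (List (Option String)) :=
  ([("en", [("b1", [("2024", [[("id", 7)]])])])], none)

def Spec_search (courses : List (String × List (String × List (String × List (List (String × Int)))))) (params : Option (List (Option String))) (out : List (List (String × Int))) : Prop := out = search_alt courses params
instance (courses : List (String × List (String × List (String × List (List (String × Int)))))) (params : Option (List (Option String))) (out : List (List (String × Int))) : Decidable (Spec_search courses params out) := by unfold Spec_search; infer_instance

-- ===== CLAIM (what is proved, stated in full; the proofs are below) =====
def Claim_equal_search : Prop := ∀ (courses : List (String × List (String × List (String × List (List (String × Int)))))) (params : Option (List (Option String))), Dom_search courses params → Pre_search courses params → Spec_search courses params (search courses params)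

-- ===== LEMMAS AND PROOFS =====

-- a 'for v in data.values(): out += g(v)' loop started at res is res ++ pvStep none
theorem pvStep_none {α : Type} (l : List (String × α)) (g : α → List (List (String × Int)))
    (res : List (List (String × Int))) :
    l.foldl (fun res p => res ++ g p.2) res = res ++ pvStep none l g := by
  rw [PySem.List.foldl_append_eq_flatMap (g := fun p : String × α => g p.2)]
  simp only [pvStep, PySem.List.foldl_append_eq_flatMap (g := g),
    List.flatMap_map, List.nil_append]

-- A's periodo level equals one B step
theorem pvA2_eq (kp : Option String) (res : List (List (String × Int)))
    (l2 : List (String × List (List (String × Int)))) :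
    pvA2 kp res l2 = res ++ pvStep kp l2 extract_ids := by
  cases kp with
  | none => exact pvStep_none l2 extract_ids res
  | some pp =>
      simp only [pvA2, pvStep]
      cases hf : l2.find? (fun q => q.1 == pp) with
      | none =>
          have : l2.any (fun q => q.1 == pp) = false := by
            rw [List.any_eq_false]
            intro q hq
            have := List.find?_eq_none.mp hf q hq
            simpa using this
          simp [this]
      | some q =>
          have : l2.any (fun q => q.1 == pp) = true := by
            rw [List.any_eq_true]
            exact ⟨q, List.mem_of_find?_eq_some hf, by simpa using List.find?_some hf⟩
          simp [this]

-- A's nivel level equals two B steps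
theorem pvA1_eq (kp1 kp2 : Option String) (res : List (List (String × Int)))
    (l1 : List (String × List (String × List (List (String × Int))))) :
    pvA1 kp1 kp2 res l1 = res ++ pvStep kp1 l1 (fun d2 => pvStep kp2 d2 extract_ids) := by
  cases kp1 with
  | none =>
      calc pvA1 none kp2 res l1
          = l1.foldl (fun res n => res ++ pvStep kp2 n.2 extract_ids) res :=
            PySem.List.foldl_congr_mem l1 _ _ res (fun acc x _ => pvA2_eq kp2 acc x.2)
        _ = res ++ pvStep none l1 (fun d2 => pvStep kp2 d2 extract_ids) :=
            pvStep_none l1 (fun d2 => pvStep kp2 d2 extract_ids) res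
  | some np =>
      simp only [pvA1]
      cases hf : l1.find? (fun q => q.1 == np) with
      | none =>
          have : l1.any (fun q => q.1 == np) = false := by
            rw [List.any_eq_false]
            intro q hq
            have := List.find?_eq_none.mp hf q hq
            simpa using this
          simp [this, pvStep, hf]
      | some q =>
          have : l1.any (fun q => q.1 == np) = true := by
            rw [List.any_eq_true]
            exact ⟨q, List.mem_of_find?_eq_some hf, by simpa using List.find?_some hf⟩
          simp only [this, if_true, hf, Option.map_some, Option.getD_some, pvA2_eq, pvStep]

-- a filtered fold whose key matches no entry is the identity
theorem foldl_no_match {α : Type} (l : List (String × α)) (G : α → List (List (String × Int)))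
    (k : String) (res : List (List (String × Int))) (h : ∀ e ∈ l, e.1 ≠ k) :
    l.foldl (fun res e => if e.1 = k then res ++ G e.2 else res) res = res := by
  induction l generalizing res with
  | nil => rfl
  | cons a t ih =>
      have ha : a.1 ≠ k := h a (List.mem_cons_self)
      simp only [List.foldl_cons, if_neg ha]
      exact ih res (fun e he => h e (List.mem_cons_of_mem a he))

-- a filtered fold over nodup keys collects exactly the (unique) matching entry
theorem foldl_filter_nodup {α : Type} (l : List (String × α)) (G : α → List (List (String × Int)))
    (k : String) (res : List (List (String × Int))) (h : (l.map Prod.fst).Nodup) :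
    l.foldl (fun res e => if e.1 = k then res ++ G e.2 else res) res =
      res ++ (match l.find? (fun p => p.1 == k) with | some p => G p.2 | none => []) := by
  induction l generalizing res with
  | nil => simp
  | cons a t ih =>
      simp only [List.map_cons, List.nodup_cons, List.mem_map] at h
      by_cases hk : a.1 = k
      · have hb : (a.1 == k) = true := by simpa using hk
        simp only [List.foldl_cons, if_pos hk, List.find?_cons, hb]
        exact foldl_no_match t G k (res ++ G a.2)
          (fun e he hek => h.1 ⟨e, he, hek.trans hk.symm⟩)
      · have hb : (a.1 == k) = false := by simpa using hk
        simp only [List.foldl_cons, if_neg hk, List.find?_cons, hb]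
        exact ih res h.2

-- ===== VERDICT (by name: the statement is the Claim_ definition above) =====
theorem search_spec : Claim_equal_search := by
  intro courses params _hdom hpre
  obtain ⟨hnd, _⟩ := hpre
  show search courses params = search_alt courses params
  cases params with
  | none =>
      show courses.foldl (fun res i => pvA1 none none res i.2) [] =
        pvStep none courses (fun d1 => pvStep none d1 (fun d2 => pvStep none d2 extract_ids))
      calc courses.foldl (fun res i => pvA1 none none res i.2) []
          = courses.foldl
              (fun res i => res ++ pvStep none i.2 (fun d2 => pvStep none d2 extract_ids)) [] :=
            PySem.List.foldl_congr_mem courses _ _ [] (fun acc x _ => pvA1_eq none none acc x.2)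
        _ = [] ++ _ := pvStep_none courses
              (fun d1 => pvStep none d1 (fun d2 => pvStep none d2 extract_ids)) []
        _ = _ := by rw [List.nil_append]
  | some ps =>
      show courses.foldl
          (fun res i =>
            if ps.getD 0 none = none ∨ ps.getD 0 none = some i.1 then
              pvA1 (ps.getD 1 none) (ps.getD 2 none) res i.2
            else res) [] =
        pvStep (ps.getD 0 none) courses
          (fun d1 => pvStep (ps.getD 1 none) d1 (fun d2 => pvStep (ps.getD 2 none) d2 extract_ids))
      cases h0 : ps.getD 0 none with
      | none =>
          calc courses.foldl
                (fun res i =>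
                  if (none : Option String) = none ∨ (none : Option String) = some i.1 then
                    pvA1 (ps.getD 1 none) (ps.getD 2 none) res i.2
                  else res) []
              = courses.foldl
                  (fun res i =>
                    res ++ pvStep (ps.getD 1 none) i.2
                      (fun d2 => pvStep (ps.getD 2 none) d2 extract_ids)) [] :=
                PySem.List.foldl_congr_mem courses _ _ []
                  (fun acc x _ => by
                    rw [if_pos (Or.inl rfl)]
                    exact pvA1_eq _ _ acc x.2)
            _ = [] ++ _ := pvStep_none courses
                  (fun d1 => pvStep (ps.getD 1 none) d1
                    (fun d2 => pvStep (ps.getD 2 none) d2 extract_ids)) []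
            _ = _ := by rw [List.nil_append]
      | some k =>
          calc courses.foldl
                (fun res i =>
                  if some k = none ∨ some k = some i.1 then
                    pvA1 (ps.getD 1 none) (ps.getD 2 none) res i.2
                  else res) []
              = courses.foldl
                  (fun res i =>
                    if i.1 = k then
                      res ++ pvStep (ps.getD 1 none) i.2
                        (fun d2 => pvStep (ps.getD 2 none) d2 extract_ids)
                    else res) [] :=
                PySem.List.foldl_congr_mem courses _ _ []
                  (fun acc x _ => by
                    by_cases hx : x.1 = k
                    · rw [if_pos hx, if_pos (Or.inr (congrArg some hx.symm))]
                      exact pvA1_eq _ _ acc x.2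
                    · rw [if_neg hx, if_neg]
                      rintro (h | h)
                      · simp at h
                      · exact hx (Option.some.inj h).symm)
            _ = _ := by
                rw [foldl_filter_nodup courses
                  (fun d1 => pvStep (ps.getD 1 none) d1
                    (fun d2 => pvStep (ps.getD 2 none) d2 extract_ids)) k [] hnd]
                show _ = pvStep (some k) courses _
                simp only [pvStep, List.nil_append]
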